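-- pv_equiv track=rewrite | github.com/chenla/hoard | src/hord/link.py | _resolve_term
-- ===== SOURCE A (Python) =====
-- def _resolve_term(term: str, index: dict) -> str:
--     """Resolve a term (UUID, filename, partial UUID) to a full UUID."""
--     # Direct match
--     uuid = index.get(term)
--     if uuid:
--         return uuid
--
--     # Partial UUID match
--     for key, val in index.items():
--         if key.startswith(term) and len(term) >= 4:
--             return val
--
--     # Case-insensitive filename match
--     term_lower = term.lower().replace(" ", "_")
--     for key, val in index.items():
--         if key.lower().replace(" ", "_").startswith(term_lower) and not _looks_like_uuid(key):
--             return val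
--
--     return ""
--
-- def _looks_like_uuid(s: str) -> bool:
--     return len(s) == 36 and s.count("-") == 4
-- ===== SOURCE B (Python) =====
-- _MISSING = object()
--
-- def _resolve_term(term: str, index: dict) -> str:
--     """Resolve a term (UUID, filename, partial UUID) to a full UUID."""
--     uuid = index.get(term)
--     if uuid:
--         return uuid
--
--     partial = filename = _MISSING
--     long_enough = len(term) >= 4
--     term_lower = term.lower().replace(" ", "_")
--     for key, val in index.items():
--         if partial is _MISSING and key.startswith(term) and long_enough:
--             partial = val
--         if filename is _MISSING and key.lower().replace(" ", "_").startswith(term_lower) \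
--                 and not (len(key) == 36 and key.count("-") == 4):
--             filename = val
--     if partial is not _MISSING:
--         return partial
--     if filename is not _MISSING:
--         return filename
--     return ""
-- ===== Notes on version B (the rewrite author's own statement) =====
-- stated objective: alternative
-- what changed: A's two sequential first-match scans (partial-UUID, then lowered filename) are merged into one loop over the items that records both first matches in sentinel variables and picks between them afterwards.
import Mathlib
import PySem

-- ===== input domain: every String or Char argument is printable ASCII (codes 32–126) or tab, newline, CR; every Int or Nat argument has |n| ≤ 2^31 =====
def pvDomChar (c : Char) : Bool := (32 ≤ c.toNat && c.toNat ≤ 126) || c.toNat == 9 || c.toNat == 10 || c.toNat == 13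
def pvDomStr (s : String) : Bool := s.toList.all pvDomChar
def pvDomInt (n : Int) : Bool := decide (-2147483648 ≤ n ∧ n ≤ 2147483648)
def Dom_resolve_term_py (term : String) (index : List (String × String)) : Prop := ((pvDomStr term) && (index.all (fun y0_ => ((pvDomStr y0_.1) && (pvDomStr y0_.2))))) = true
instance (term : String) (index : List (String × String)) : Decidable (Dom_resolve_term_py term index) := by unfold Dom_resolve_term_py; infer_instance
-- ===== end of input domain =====

-- ===== PORT A =====
-- B merges A's two sequential first-match scans into one loop with two first-match sentinels (objective: alternative; return value only).
def looks_like_uuid_py (s : String) : Bool :=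
  PySem.Str.len s == 36 && PySem.Str.count s "-" == 4

def resolve_term_py (term : String) (index : List (String × String)) : String :=
  let d := PySem.Dict.ofList index
  -- fallthrough after the direct match: the two scans of A, in order
  let after :=
    match d.items.find? (fun p => PySem.Str.startswith p.1 term && decide (4 ≤ PySem.Str.len term)) with
    | some p => p.2
    | none =>
      let term_lower := PySem.Str.replace (PySem.Str.lower term) " " "_"
      match d.items.find? (fun p =>
          PySem.Str.startswith (PySem.Str.replace (PySem.Str.lower p.1) " " "_") term_lower
            && !looks_like_uuid_py p.1) with
      | some p => p.2
      | none => ""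
  match d.get? term with
  | some u => if u == "" then after else u   -- 'if uuid:' — falsy on None and ""
  | none => after

-- ===== PORT B =====
-- one pass recording the first partial-UUID match and the first filename match
def resolve_term_scan (term : String) (term_lower : String) (le : Bool) :
    List (String × String) → Option String → Option String → Option String × Option String
  | [], p, f => (p, f)
  | (k, v) :: rest, p, f =>
    let p' := if p.isNone && (PySem.Str.startswith k term && le) then some v else p
    let f' := if f.isNone && (PySem.Str.startswith (PySem.Str.replace (PySem.Str.lower k) " " "_") term_lower
                && !(PySem.Str.len k == 36 && PySem.Str.count k "-" == 4)) then some v else f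
    resolve_term_scan term term_lower le rest p' f'

def resolve_term_py_alt (term : String) (index : List (String × String)) : String :=
  let d := PySem.Dict.ofList index
  let uuid := d.getD term ""
  if uuid == "" then
    let term_lower := PySem.Str.replace (PySem.Str.lower term) " " "_"
    match resolve_term_scan term term_lower (decide (4 ≤ PySem.Str.len term)) d.items none none with
    | (some v, _) => v
    | (none, some v) => v
    | (none, none) => ""
  else uuid

-- ===== PRECONDITION & SPEC =====
def Spec_resolve_term_py (term : String) (index : List (String × String)) (out : String) : Prop := out = resolve_term_py_alt term index
instance (term : String) (index : List (String × String)) (out : String) : Decidable (Spec_resolve_term_py term index out) := by unfold Spec_resolve_term_py; infer_instance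

-- ===== CLAIM (what is proved, stated in full; the proofs are below) =====
def Claim_equal_resolve_term_py : Prop := ∀ (term : String) (index : List (String × String)), Dom_resolve_term_py term index → Spec_resolve_term_py term index (resolve_term_py term index)

-- ===== LEMMAS AND PROOFS =====

-- the single pass computes, for each sentinel still unset, the first match of its predicate
theorem resolve_term_scan_eq (term term_lower : String) (le : Bool)
    (l : List (String × String)) (p f : Option String) :
    resolve_term_scan term term_lower le l p f =
      (p.or ((l.find? (fun q => PySem.Str.startswith q.1 term && le)).map (·.2)),
       f.or ((l.find? (fun q =>
          PySem.Str.startswith (PySem.Str.replace (PySem.Str.lower q.1) " " "_") term_lower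
            && !(PySem.Str.len q.1 == 36 && PySem.Str.count q.1 "-" == 4))).map (·.2))) := by
  induction l generalizing p f with
  | nil => simp [resolve_term_scan]
  | cons kv rest ih =>
    obtain ⟨k, v⟩ := kv
    rw [resolve_term_scan, ih]
    cases hc1 : (PySem.Str.startswith k term && le) <;>
      cases hc2 : (PySem.Str.startswith (PySem.Str.replace (PySem.Str.lower k) " " "_") term_lower
          && !(PySem.Str.len k == 36 && PySem.Str.count k "-" == 4)) <;>
      cases p <;> cases f <;>
      simp_all [Option.or]

-- ===== VERDICT (by name: the statement is the Claim_ definition above) =====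
theorem resolve_term_py_spec : Claim_equal_resolve_term_py := by
  intro term index _
  unfold Spec_resolve_term_py resolve_term_py resolve_term_py_alt looks_like_uuid_py
  simp only [resolve_term_scan_eq, PySem.Dict.getD_eq_get?_getD]
  cases h : (PySem.Dict.ofList index).get? term with
  | none =>
    cases h1 : (PySem.Dict.ofList index).items.find?
        (fun q => PySem.Str.startswith q.1 term && decide (4 ≤ PySem.Str.len term)) <;>
      cases h2 : (PySem.Dict.ofList index).items.find?
        (fun q => PySem.Str.startswith (PySem.Str.replace (PySem.Str.lower q.1) " " "_")
            (PySem.Str.replace (PySem.Str.lower term) " " "_")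
          && !(PySem.Str.len q.1 == 36 && PySem.Str.count q.1 "-" == 4)) <;>
      simp [Option.or]
  | some u =>
    by_cases hu : u = "" <;>
      cases h1 : (PySem.Dict.ofList index).items.find?
        (fun q => PySem.Str.startswith q.1 term && decide (4 ≤ PySem.Str.len term)) <;>
      cases h2 : (PySem.Dict.ofList index).items.find?
        (fun q => PySem.Str.startswith (PySem.Str.replace (PySem.Str.lower q.1) " " "_")
            (PySem.Str.replace (PySem.Str.lower term) " " "_")
          && !(PySem.Str.len q.1 == 36 && PySem.Str.count q.1 "-" == 4)) <;>
      simp [Option.or, hu]
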